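-- pv_equiv track=rewrite | github.com/LorenaPujante/MimicIII_BDOG_Benchmark | runTests_vm6.py | getArrayQueries
-- ===== SOURCE A (Python) =====
-- queryNames = ['1', '2', '2p', '3', '4', '4p', '5', '6', '6m']
--
-- def getArrayQueries(db):
--     arrayQueries = []
--     for i in range(len(queryNames)):
--         qName = queryNames[i]
--
--         if qName == "1":
--             arrayQueries.append([])
--             arrayQueries[i].append(db + " " + qName + " 2000-01-01T00:00:00 2000-01-31T00:00:00 80026 7")
--             arrayQueries[i].append(db + " " + qName + " 2000-02-01T00:00:00 2000-02-29T00:00:00 80004 7")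
--             arrayQueries[i].append(db + " " + qName + " 2000-03-01T00:00:00 2000-03-31T00:00:00 80004 7")
--             arrayQueries[i].append(db + " " + qName + " 2000-04-01T00:00:00 2000-04-30T00:00:00 80293 7")
--             arrayQueries[i].append(db + " " + qName + " 2000-05-01T00:00:00 2000-05-31T00:00:00 80081 7")
--             arrayQueries[i].append(db + " " + qName + " 2000-06-01T00:00:00 2000-06-30T00:00:00 80293 7")
--             arrayQueries[i].append(db + " " + qName + " 2000-07-01T00:00:00 2000-07-31T00:00:00 80293 7")
--             arrayQueries[i].append(db + " " + qName + " 2000-08-01T00:00:00 2000-08-31T00:00:00 80004 7")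
--             arrayQueries[i].append(db + " " + qName + " 2000-09-01T00:00:00 2000-09-30T00:00:00 80293 7")
--             arrayQueries[i].append(db + " " + qName + " 2000-10-01T00:00:00 2000-10-31T00:00:00 80139 7")
--             arrayQueries[i].append(db + " " + qName + " 2000-11-01T00:00:00 2000-11-30T00:00:00 80004 7")
--             arrayQueries[i].append(db + " " + qName + " 2000-12-01T00:00:00 2000-12-31T00:00:00 80058 7")
--
--         if qName == "2"  or  qName == "2p":
--             arrayQueries.append([])
--             arrayQueries[i].append(db + " " + qName + " 2000-01-01T00:00:00 2000-01-31T00:00:00 80026 19588")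
--             arrayQueries[i].append(db + " " + qName + " 2000-02-01T00:00:00 2000-02-29T00:00:00 80004 56527")
--             arrayQueries[i].append(db + " " + qName + " 2000-03-01T00:00:00 2000-03-31T00:00:00 80004 20747")
--             arrayQueries[i].append(db + " " + qName + " 2000-04-01T00:00:00 2000-04-30T00:00:00 80293 91883")
--             arrayQueries[i].append(db + " " + qName + " 2000-05-01T00:00:00 2000-05-31T00:00:00 80081 97038")
--             arrayQueries[i].append(db + " " + qName + " 2000-06-01T00:00:00 2000-06-30T00:00:00 80293 42776")
--             arrayQueries[i].append(db + " " + qName + " 2000-07-01T00:00:00 2000-07-31T00:00:00 80293 68251")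
--             arrayQueries[i].append(db + " " + qName + " 2000-08-01T00:00:00 2000-08-31T00:00:00 80004 77807")
--             arrayQueries[i].append(db + " " + qName + " 2000-09-01T00:00:00 2000-09-30T00:00:00 80293 94767")
--             arrayQueries[i].append(db + " " + qName + " 2000-10-01T00:00:00 2000-10-31T00:00:00 80139 878")
--             arrayQueries[i].append(db + " " + qName + " 2000-11-01T00:00:00 2000-11-30T00:00:00 80004 20972")
--             arrayQueries[i].append(db + " " + qName + " 2000-12-01T00:00:00 2000-12-31T00:00:00 80058 50629")
--
--         if qName == "3":
--             arrayQueries.append([])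
--             arrayQueries[i].append(db + " " + qName + " 2000-01-01T00:00:00 2000-01-31T00:00:00 27302 5692 27574")
--             arrayQueries[i].append(db + " " + qName + " 2000-02-01T00:00:00 2000-02-29T00:00:00 5937 16232 26716")
--             arrayQueries[i].append(db + " " + qName + " 2000-03-01T00:00:00 2000-03-31T00:00:00 16421 29426 20253")
--             arrayQueries[i].append(db + " " + qName + " 2000-04-01T00:00:00 2000-04-30T00:00:00 9036 6183 6492")
--             arrayQueries[i].append(db + " " + qName + " 2000-05-01T00:00:00 2000-05-31T00:00:00 1855 75714 7538")
--             arrayQueries[i].append(db + " " + qName + " 2000-06-01T00:00:00 2000-06-30T00:00:00 721 71243 21460")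
--             arrayQueries[i].append(db + " " + qName + " 2000-07-01T00:00:00 2000-07-31T00:00:00 11370 61163 14217")
--             arrayQueries[i].append(db + " " + qName + " 2000-08-01T00:00:00 2000-08-31T00:00:00 66717 24129 97652")
--             arrayQueries[i].append(db + " " + qName + " 2000-09-01T00:00:00 2000-09-30T00:00:00 17187 82950 75856")
--             arrayQueries[i].append(db + " " + qName + " 2000-10-01T00:00:00 2000-10-31T00:00:00 93321 43128 90802")
--             arrayQueries[i].append(db + " " + qName + " 2000-11-01T00:00:00 2000-11-30T00:00:00 3807 48875 13207")
--             arrayQueries[i].append(db + " " + qName + " 2000-12-01T00:00:00 2000-12-31T00:00:00 84965 14507 22416")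
--             '''arrayQueries[i].append(db + " " + qName + " 2000-01-01T00:00:00 2000-01-31T00:00:00 27302 90944 89447 5692 62190 12469 27574 3639 19798")
--             arrayQueries[i].append(db + " " + qName + " 2000-02-01T00:00:00 2000-02-29T00:00:00 5937 3280 61825 16232 15935 25590 26716 1858 4409")
--             arrayQueries[i].append(db + " " + qName + " 2000-03-01T00:00:00 2000-03-31T00:00:00 16421 18430 22564 29426 94924 8533 20253 3251 3100")
--             arrayQueries[i].append(db + " " + qName + " 2000-04-01T00:00:00 2000-04-30T00:00:00 9036 25697 13188 6183 10943 53286 6492 11146 83749")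
--             arrayQueries[i].append(db + " " + qName + " 2000-05-01T00:00:00 2000-05-31T00:00:00 1855 44717 88336 75714 59889 64570 7538 27530 18697")
--             arrayQueries[i].append(db + " " + qName + " 2000-06-01T00:00:00 2000-06-30T00:00:00 721 3306 3301 71243 42672 75101 21460 8678 69338")
--             arrayQueries[i].append(db + " " + qName + " 2000-07-01T00:00:00 2000-07-31T00:00:00 11370 10142 30692 61163 12795 31660 14217 11341 19851")
--             arrayQueries[i].append(db + " " + qName + " 2000-08-01T00:00:00 2000-08-31T00:00:00 66717 2340 11592 24129 62415 4155 97652 75281 51195")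
--             arrayQueries[i].append(db + " " + qName + " 2000-09-01T00:00:00 2000-09-30T00:00:00 17187 2165 55543 82950 10940 16992 75856 8653 20383")
--             arrayQueries[i].append(db + " " + qName + " 2000-10-01T00:00:00 2000-10-31T00:00:00 93321 65537 62047 43128 57158 75488 90802 68308 8475")
--             arrayQueries[i].append(db + " " + qName + " 2000-11-01T00:00:00 2000-11-30T00:00:00 3807 25458 99647 48875 8215 25949 13207 9744 10732")
--             arrayQueries[i].append(db + " " + qName + " 2000-12-01T00:00:00 2000-12-31T00:00:00 84965 15918 25175 14507 15784 60413 22416 76017 1839")'''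
--
--
--         if qName == "4"  or  qName == "4p":
--             arrayQueries.append([])
--             arrayQueries[i].append(db + " " + qName + " 2000-01-14T00:00:00 2000-01-30T00:00:00 31935 82642")
--
--         if qName == "5":
--             arrayQueries.append([])
--             arrayQueries[i].append(db + " " + qName + " 2000-01-14T00:00:00 2000-01-30T00:00:00 80155 5193 31935 82642 13181 21040")
--
--         if qName == "6"  or  qName == "6m":
--             arrayQueries.append([])
--             arrayQueries[i].append(db + " " + qName + " 2000-01-14T00:00:00 2000-01-30T00:00:00 3 0c 80155")
--
--     return arrayQueries
-- ===== SOURCE B (Python) =====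
-- queryNames = ['1', '2', '2p', '3', '4', '4p', '5', '6', '6m']
--
-- # Days per month of year 2000 (a leap year); the monthly date spans are
-- # computed from these instead of being written out as literal strings.
-- _DAYS = [31, 29, 31, 30, 31, 30, 31, 31, 30, 31, 30, 31]
--
-- _WARDS = [80026, 80004, 80004, 80293, 80081, 80293, 80293, 80004, 80293,
--           80139, 80004, 80058]
--
-- _PAT2 = [19588, 56527, 20747, 91883, 97038, 42776, 68251, 77807, 94767,
--          878, 20972, 50629]
--
-- _ROWS3 = [[27302, 5692, 27574], [5937, 16232, 26716], [16421, 29426, 20253],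
--           [9036, 6183, 6492], [1855, 75714, 7538], [721, 71243, 21460],
--           [11370, 61163, 14217], [66717, 24129, 97652], [17187, 82950, 75856],
--           [93321, 43128, 90802], [3807, 48875, 13207], [84965, 14507, 22416]]
--
-- # token tails of the single-query names, over the fixed Jan 14-30 span
-- _SINGLE = {
--     '4': '31935 82642',
--     '4p': '31935 82642',
--     '5': '80155 5193 31935 82642 13181 21040',
--     '6': '3 0c 80155',
--     '6m': '3 0c 80155',
-- }
--
--
-- def _monthly_rows(qName):
--     if qName == '1':
--         return [[w, 7] for w in _WARDS]
--     if qName in ('2', '2p'):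
--         return [[w, p] for w, p in zip(_WARDS, _PAT2)]
--     if qName == '3':
--         return _ROWS3
--     return None
--
--
-- def _span(m):
--     mm = '0' + str(m) if m < 10 else str(m)
--     return '2000-' + mm + '-01T00:00:00 2000-' + mm + '-' + str(_DAYS[m - 1]) + 'T00:00:00'
--
--
-- def getArrayQueries(db):
--     out = []
--     for qName in queryNames:
--         prefix = db + ' ' + qName + ' '
--         rows = _monthly_rows(qName)
--         if rows is not None:
--             out.append([prefix + _span(m) + ' ' + ' '.join(str(v) for v in row)
--                         for m, row in enumerate(rows, start=1)])
--         else: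
--             out.append([prefix + '2000-01-14T00:00:00 2000-01-30T00:00:00 ' + _SINGLE[qName]])
--     return out
-- ===== Notes on version B (the rewrite author's own statement) =====
-- stated objective: alternative
-- what changed: Instead of A's chain of per-name if-branches appending hard-coded full query strings, B computes the twelve monthly date spans from a days-per-month table (zero-padded month, last day of month of year 2000) and assembles each line by zipping those computed spans with per-name numeric columns, joining the numbers at build time; the five single-query names come from a small token-tail map.
import Mathlib
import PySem

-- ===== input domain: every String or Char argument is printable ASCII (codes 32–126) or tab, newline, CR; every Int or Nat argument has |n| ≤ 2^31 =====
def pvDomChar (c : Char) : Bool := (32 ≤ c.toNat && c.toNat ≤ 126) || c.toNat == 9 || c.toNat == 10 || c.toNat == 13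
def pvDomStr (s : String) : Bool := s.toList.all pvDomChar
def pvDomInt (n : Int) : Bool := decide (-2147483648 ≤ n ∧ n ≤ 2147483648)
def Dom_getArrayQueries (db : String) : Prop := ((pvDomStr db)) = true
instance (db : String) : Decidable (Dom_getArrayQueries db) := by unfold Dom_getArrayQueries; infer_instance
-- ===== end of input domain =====

-- B computes the twelve monthly date spans and number columns arithmetically (zip over month lengths of year 2000) instead of A's chain of if-branches with hard-coded full strings; objective: alternative decomposition, same cost.


-- ===== PORT A =====
-- Python: arrayQueries[i].append(s)
def pyAppendAt (xs : List (List String)) (i : Nat) (s : String) : List (List String) :=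
  xs.modify i (fun l => l ++ [s])

def pvQueryNames : List String := ["1", "2", "2p", "3", "4", "4p", "5", "6", "6m"]

def getArrayQueries (db : String) : List (List String) :=
  (List.range pvQueryNames.length).foldl (fun acc i =>
    let qName := pvQueryNames.getD i ""
    let acc := if qName == "1" then
      let acc := acc ++ [[]]
      let acc := pyAppendAt acc i (db ++ " " ++ qName ++ " " ++ "2000-01-01T00:00:00 2000-01-31T00:00:00 80026 7")
      let acc := pyAppendAt acc i (db ++ " " ++ qName ++ " " ++ "2000-02-01T00:00:00 2000-02-29T00:00:00 80004 7")
      let acc := pyAppendAt acc i (db ++ " " ++ qName ++ " " ++ "2000-03-01T00:00:00 2000-03-31T00:00:00 80004 7")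
      let acc := pyAppendAt acc i (db ++ " " ++ qName ++ " " ++ "2000-04-01T00:00:00 2000-04-30T00:00:00 80293 7")
      let acc := pyAppendAt acc i (db ++ " " ++ qName ++ " " ++ "2000-05-01T00:00:00 2000-05-31T00:00:00 80081 7")
      let acc := pyAppendAt acc i (db ++ " " ++ qName ++ " " ++ "2000-06-01T00:00:00 2000-06-30T00:00:00 80293 7")
      let acc := pyAppendAt acc i (db ++ " " ++ qName ++ " " ++ "2000-07-01T00:00:00 2000-07-31T00:00:00 80293 7")
      let acc := pyAppendAt acc i (db ++ " " ++ qName ++ " " ++ "2000-08-01T00:00:00 2000-08-31T00:00:00 80004 7")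
      let acc := pyAppendAt acc i (db ++ " " ++ qName ++ " " ++ "2000-09-01T00:00:00 2000-09-30T00:00:00 80293 7")
      let acc := pyAppendAt acc i (db ++ " " ++ qName ++ " " ++ "2000-10-01T00:00:00 2000-10-31T00:00:00 80139 7")
      let acc := pyAppendAt acc i (db ++ " " ++ qName ++ " " ++ "2000-11-01T00:00:00 2000-11-30T00:00:00 80004 7")
      let acc := pyAppendAt acc i (db ++ " " ++ qName ++ " " ++ "2000-12-01T00:00:00 2000-12-31T00:00:00 80058 7")
      acc
    else acc
    let acc := if qName == "2" || qName == "2p" then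
      let acc := acc ++ [[]]
      let acc := pyAppendAt acc i (db ++ " " ++ qName ++ " " ++ "2000-01-01T00:00:00 2000-01-31T00:00:00 80026 19588")
      let acc := pyAppendAt acc i (db ++ " " ++ qName ++ " " ++ "2000-02-01T00:00:00 2000-02-29T00:00:00 80004 56527")
      let acc := pyAppendAt acc i (db ++ " " ++ qName ++ " " ++ "2000-03-01T00:00:00 2000-03-31T00:00:00 80004 20747")
      let acc := pyAppendAt acc i (db ++ " " ++ qName ++ " " ++ "2000-04-01T00:00:00 2000-04-30T00:00:00 80293 91883")
      let acc := pyAppendAt acc i (db ++ " " ++ qName ++ " " ++ "2000-05-01T00:00:00 2000-05-31T00:00:00 80081 97038")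
      let acc := pyAppendAt acc i (db ++ " " ++ qName ++ " " ++ "2000-06-01T00:00:00 2000-06-30T00:00:00 80293 42776")
      let acc := pyAppendAt acc i (db ++ " " ++ qName ++ " " ++ "2000-07-01T00:00:00 2000-07-31T00:00:00 80293 68251")
      let acc := pyAppendAt acc i (db ++ " " ++ qName ++ " " ++ "2000-08-01T00:00:00 2000-08-31T00:00:00 80004 77807")
      let acc := pyAppendAt acc i (db ++ " " ++ qName ++ " " ++ "2000-09-01T00:00:00 2000-09-30T00:00:00 80293 94767")
      let acc := pyAppendAt acc i (db ++ " " ++ qName ++ " " ++ "2000-10-01T00:00:00 2000-10-31T00:00:00 80139 878")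
      let acc := pyAppendAt acc i (db ++ " " ++ qName ++ " " ++ "2000-11-01T00:00:00 2000-11-30T00:00:00 80004 20972")
      let acc := pyAppendAt acc i (db ++ " " ++ qName ++ " " ++ "2000-12-01T00:00:00 2000-12-31T00:00:00 80058 50629")
      acc
    else acc
    let acc := if qName == "3" then
      let acc := acc ++ [[]]
      let acc := pyAppendAt acc i (db ++ " " ++ qName ++ " " ++ "2000-01-01T00:00:00 2000-01-31T00:00:00 27302 5692 27574")
      let acc := pyAppendAt acc i (db ++ " " ++ qName ++ " " ++ "2000-02-01T00:00:00 2000-02-29T00:00:00 5937 16232 26716")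
      let acc := pyAppendAt acc i (db ++ " " ++ qName ++ " " ++ "2000-03-01T00:00:00 2000-03-31T00:00:00 16421 29426 20253")
      let acc := pyAppendAt acc i (db ++ " " ++ qName ++ " " ++ "2000-04-01T00:00:00 2000-04-30T00:00:00 9036 6183 6492")
      let acc := pyAppendAt acc i (db ++ " " ++ qName ++ " " ++ "2000-05-01T00:00:00 2000-05-31T00:00:00 1855 75714 7538")
      let acc := pyAppendAt acc i (db ++ " " ++ qName ++ " " ++ "2000-06-01T00:00:00 2000-06-30T00:00:00 721 71243 21460")
      let acc := pyAppendAt acc i (db ++ " " ++ qName ++ " " ++ "2000-07-01T00:00:00 2000-07-31T00:00:00 11370 61163 14217")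
      let acc := pyAppendAt acc i (db ++ " " ++ qName ++ " " ++ "2000-08-01T00:00:00 2000-08-31T00:00:00 66717 24129 97652")
      let acc := pyAppendAt acc i (db ++ " " ++ qName ++ " " ++ "2000-09-01T00:00:00 2000-09-30T00:00:00 17187 82950 75856")
      let acc := pyAppendAt acc i (db ++ " " ++ qName ++ " " ++ "2000-10-01T00:00:00 2000-10-31T00:00:00 93321 43128 90802")
      let acc := pyAppendAt acc i (db ++ " " ++ qName ++ " " ++ "2000-11-01T00:00:00 2000-11-30T00:00:00 3807 48875 13207")
      let acc := pyAppendAt acc i (db ++ " " ++ qName ++ " " ++ "2000-12-01T00:00:00 2000-12-31T00:00:00 84965 14507 22416")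
      acc
    else acc
    let acc := if qName == "4" || qName == "4p" then
      let acc := acc ++ [[]]
      let acc := pyAppendAt acc i (db ++ " " ++ qName ++ " " ++ "2000-01-14T00:00:00 2000-01-30T00:00:00 31935 82642")
      acc
    else acc
    let acc := if qName == "5" then
      let acc := acc ++ [[]]
      let acc := pyAppendAt acc i (db ++ " " ++ qName ++ " " ++ "2000-01-14T00:00:00 2000-01-30T00:00:00 80155 5193 31935 82642 13181 21040")
      acc
    else acc
    let acc := if qName == "6" || qName == "6m" then
      let acc := acc ++ [[]]
      let acc := pyAppendAt acc i (db ++ " " ++ qName ++ " " ++ "2000-01-14T00:00:00 2000-01-30T00:00:00 3 0c 80155")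
      acc
    else acc
    acc) []


-- ===== PORT B =====
-- days per month of year 2000 (leap); monthly date spans are computed from these
def pvDays : List Int := [31, 29, 31, 30, 31, 30, 31, 31, 30, 31, 30, 31]
def pvWards : List Int := [80026, 80004, 80004, 80293, 80081, 80293, 80293, 80004, 80293, 80139, 80004, 80058]
def pvPat2 : List Int := [19588, 56527, 20747, 91883, 97038, 42776, 68251, 77807, 94767, 878, 20972, 50629]
def pvRows3 : List (List Int) := [[27302, 5692, 27574], [5937, 16232, 26716], [16421, 29426, 20253], [9036, 6183, 6492], [1855, 75714, 7538], [721, 71243, 21460], [11370, 61163, 14217], [66717, 24129, 97652], [17187, 82950, 75856], [93321, 43128, 90802], [3807, 48875, 13207], [84965, 14507, 22416]]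

-- token tails of the single-query names (B's _SINGLE dict)
def pvSingle : PySem.Dict String String :=
  ((((PySem.Dict.empty.insert "4" "31935 82642").insert "4p" "31935 82642").insert
    "5" "80155 5193 31935 82642 13181 21040").insert "6" "3 0c 80155").insert "6m" "3 0c 80155"

-- B's _monthly_rows
def pvMonthlyRows (qName : String) : Option (List (List Int)) :=
  if qName == "1" then some (pvWards.map (fun w => [w, 7]))
  else if qName == "2" || qName == "2p" then some ((pvWards.zip pvPat2).map (fun p => [p.1, p.2]))
  else if qName == "3" then some pvRows3
  else none

-- B's _span(m): the month-m date span of year 2000, computed (not a literal)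
def pvSpan (m : Int) : String :=
  let mm := if m < 10 then "0" ++ PySem.Int.toStr m else PySem.Int.toStr m
  "2000-" ++ mm ++ "-01T00:00:00 2000-" ++ mm ++ "-" ++ PySem.Int.toStr (pvDays.getD (m - 1).toNat 0) ++ "T00:00:00"

def getArrayQueries_alt (db : String) : List (List String) :=
  pvQueryNames.foldl (fun out qName =>
    let prefixStr := db ++ " " ++ qName ++ " "
    match pvMonthlyRows qName with
    | some rows =>
        out ++ [(PySem.List.enumerate rows 1).map (fun mr =>
          prefixStr ++ pvSpan mr.1 ++ " " ++
            PySem.Str.join " " (mr.2.map PySem.Int.toStr))]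
    | none =>
        out ++ [[prefixStr ++ "2000-01-14T00:00:00 2000-01-30T00:00:00 " ++ pvSingle.getD qName ""]]) []


-- ===== PRECONDITION & SPEC =====
def Spec_getArrayQueries (db : String) (out : List (List String)) : Prop := out = getArrayQueries_alt db
instance (db : String) (out : List (List String)) : Decidable (Spec_getArrayQueries db out) := by unfold Spec_getArrayQueries; infer_instance

-- ===== CLAIM (what is proved, stated in full; the proofs are below) =====
def Claim_equal_getArrayQueries : Prop := ∀ (db : String), Dom_getArrayQueries db → Spec_getArrayQueries db (getArrayQueries db)

-- ===== LEMMAS AND PROOFS =====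

-- ===== VERDICT (by name: the statement is the Claim_ definition above) =====
set_option maxHeartbeats 4000000 in
theorem getArrayQueries_spec : Claim_equal_getArrayQueries := by
  intro db _
  show getArrayQueries db = getArrayQueries_alt db
  simp [getArrayQueries, getArrayQueries_alt, pvQueryNames, pyAppendAt, pvMonthlyRows,
    pvSpan, pvSingle, pvDays, pvWards, pvPat2, pvRows3, PySem.List.enumerate, PySem.Str.join,
    PySem.Int.toStr, PySem.Dict.getD, List.range_succ, List.modify, List.modifyTailIdx,
    List.modifyHead, List.modifyTailIdx.go, String.append_assoc]
  decide
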